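-- pv_equiv track=rewrite | github.com/nikita-mamro/SPBU_Homework_Sem5 | Formal Languages/Lab1/KIJ.py | IJ
-- ===== SOURCE A (Python) =====
-- def IJ(k):
--     K = 0
--     N = 1
--     while (K != k):
--         for j in range(1, N + 1):
--             K += 1
--             i = N + 1 - j
--             if K == k:
--                 return (i, j)
--
--         N += 1
--
--     return (i, j)
-- ===== SOURCE B (Python) =====
-- def IJ(k):
--     # binary search for the smallest diagonal N with N*(N+1)//2 >= k, then direct arithmetic
--     lo, hi = 1, k
--     while lo < hi:
--         mid = (lo + hi) // 2
--         if mid * (mid + 1) // 2 >= k: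
--             hi = mid
--         else:
--             lo = mid + 1
--     j = k - lo * (lo - 1) // 2
--     return (lo + 1 - j, j)
-- ===== Notes on version B (the rewrite author's own statement) =====
-- stated objective: faster
-- what changed: Replaces the element-by-element walk over all diagonals (O(k) iterations) by a binary search for the diagonal index N (smallest N with N*(N+1)/2 >= k) plus direct arithmetic for i and j.
import Mathlib
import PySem

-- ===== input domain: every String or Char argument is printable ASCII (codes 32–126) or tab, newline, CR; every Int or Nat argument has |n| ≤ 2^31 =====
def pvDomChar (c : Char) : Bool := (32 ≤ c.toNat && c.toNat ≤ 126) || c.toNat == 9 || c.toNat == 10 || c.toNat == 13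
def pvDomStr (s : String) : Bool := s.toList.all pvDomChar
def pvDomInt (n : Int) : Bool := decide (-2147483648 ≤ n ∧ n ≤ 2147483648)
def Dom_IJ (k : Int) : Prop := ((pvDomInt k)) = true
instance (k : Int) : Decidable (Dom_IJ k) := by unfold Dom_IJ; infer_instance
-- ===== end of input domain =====

-- B replaces A's element-by-element walk over the diagonals by a binary search for the
-- diagonal plus direct arithmetic (asymptotically faster; return value proved equal on Pre_).

-- ===== PORT A =====
-- the inner 'for j in range(1, N+1)' loop: returns the early result, or the updated K
def IJ_for : List Int → Int → Int → Int → Option (List Int) × Int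
  | [], K, _, _ => (none, K)
  | j :: js, K, N, k =>
      let K' := K + 1
      let i := N + 1 - j
      if K' = k then (some [i, j], K')
      else IJ_for js K' N k

-- the outer 'while K != k' loop; fuel only makes it total (never exhausted when 1 ≤ k)
def IJ_while : Nat → Int → Int → Int → List Int
  | 0, _, _, _ => []
  | fuel + 1, K, N, k =>
      if K ≠ k then
        match IJ_for (PySem.List.pyRange 1 (N + 1) 1) K N k with
        | (some r, _) => r
        | (none, K') => IJ_while fuel K' (N + 1) k
      else []   -- Python reaches 'return (i, j)' with i, j unbound: UnboundLocalError; outside Pre_IJ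

def IJ (k : Int) : List Int := IJ_while (k.toNat + 1) 0 1 k

-- ===== PORT B =====
-- 'while lo < hi' binary search from Source B
def IJ_bsearch (lo hi k : Int) : Int :=
  if h : lo < hi then
    let mid := PySem.Int.floordiv (lo + hi) 2
    if k ≤ PySem.Int.floordiv (mid * (mid + 1)) 2 then
      IJ_bsearch lo mid k
    else
      IJ_bsearch (mid + 1) hi k
  else lo
termination_by (hi - lo).toNat
decreasing_by
  · have h1 := PySem.Int.floordiv_two_mid_bounds (le_of_lt h)
    have h2 : PySem.Int.floordiv (lo + hi) 2 < hi := by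
      rw [PySem.Int.floordiv_eq_ediv_of_pos (by omega : (0:Int) < 2)]
      omega
    omega
  · have h1 := PySem.Int.floordiv_two_mid_bounds (le_of_lt h)
    omega

def IJ_alt (k : Int) : List Int :=
  let N := IJ_bsearch 1 k k
  let j := k - PySem.Int.floordiv (N * (N - 1)) 2
  [N + 1 - j, j]

-- ===== PRECONDITION & SPEC =====
-- Pre_: for k = 0 the Python A raises UnboundLocalError (reaches the final return with i, j unbound), and for k < 0
-- the while loop never terminates; A returns normally exactly on 1 ≤ k.
def Pre_IJ (k : Int) : Prop := 1 ≤ k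
instance (k : Int) : Decidable (Pre_IJ k) := by unfold Pre_IJ; infer_instance
def pvWitness_IJ : Int := (7)
def Spec_IJ (k : Int) (out : List Int) : Prop := out = IJ_alt k
instance (k : Int) (out : List Int) : Decidable (Spec_IJ k out) := by unfold Spec_IJ; infer_instance

-- ===== CLAIM (what is proved, stated in full; the proofs are below) =====
def Claim_equal_IJ : Prop := ∀ (k : Int), Dom_IJ k → Pre_IJ k → Spec_IJ k (IJ k)

-- ===== LEMMAS AND PROOFS =====

-- triangular number, as B computes it (Int `/` is Euclidean division; divisor 2 > 0)
def tri (n : Int) : Int := n * (n + 1) / 2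

theorem two_tri (n : Int) : 2 * tri n = n * (n + 1) := by
  unfold tri
  have h : 2 ∣ n * (n + 1) := Int.even_mul_succ_self n |>.two_dvd
  exact Int.mul_ediv_cancel' h

theorem tri_lt_tri {a b : Int} (h0 : 0 ≤ a) (h : a < b) : tri a < tri b := by
  have ha := two_tri a
  have hb := two_tri b
  nlinarith

theorem tri_succ (n : Int) : tri n = tri (n - 1) + n := by
  have ha := two_tri n
  have hb := two_tri (n - 1)
  nlinarith

theorem IJ_for_spec (N k : Int) : ∀ (n : Nat) (a K : Int),
    IJ_for (PySem.List.pyRange a (a + n) 1) K N k =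
      if K < k ∧ k ≤ K + n then (some [N + 1 - (a + (k - K) - 1), a + (k - K) - 1], k)
      else (none, K + n) := by
  intro n
  induction n with
  | zero =>
    intro a K
    rw [PySem.List.pyRange_one_eq_nil (by omega)]
    rw [if_neg (by omega)]
    simp [IJ_for]
  | succ n ih =>
    intro a K
    rw [PySem.List.pyRange_one_cons (by push_cast; omega)]
    show (if K + 1 = k then _ else IJ_for (PySem.List.pyRange (a+1) (a + (n+1 : Nat)) 1) (K+1) N k) = _
    have harg : a + ((n+1 : Nat) : Int) = (a + 1) + (n : Nat) := by push_cast; omega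
    by_cases hk : K + 1 = k
    · rw [if_pos hk, if_pos (by push_cast; omega)]
      have : a + (k - K) - 1 = a := by omega
      rw [this, hk]
    · rw [if_neg hk, harg, ih (a+1) (K+1)]
      by_cases hc : K < k ∧ k ≤ K + ((n+1 : Nat) : Int)
      · rw [if_pos (by push_cast at hc ⊢; omega), if_pos hc]
        have h1 : a + 1 + (k - (K + 1)) - 1 = a + (k - K) - 1 := by omega
        rw [h1]
      · rw [if_neg (by push_cast at hc ⊢; omega), if_neg hc]
        have : K + 1 + ((n : Nat) : Int) = K + ((n+1 : Nat) : Int) := by push_cast; omega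
        rw [this]

theorem IJ_while_spec : ∀ (fuel : Nat) (N M k : Int), 1 ≤ N → N ≤ M →
    tri (N - 1) < k → tri (M - 1) < k → k ≤ tri M → (M - N).toNat < fuel →
    IJ_while fuel (tri (N - 1)) N k = [M + 1 - (k - tri (M - 1)), k - tri (M - 1)] := by
  intro fuel
  induction fuel with
  | zero => intro N M k _ _ _ _ _ hf; omega
  | succ fuel ih =>
    intro N M k hN hNM hNk hMk hkM hf
    rw [IJ_while, if_pos (by omega)]
    have hfor := IJ_for_spec N k N.toNat 1 (tri (N - 1))
    rw [show (1 : Int) + ((N.toNat : Nat) : Int) = N + 1 by omega] at hfor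
    rw [hfor]
    by_cases hc : k ≤ tri (N - 1) + ((N.toNat : Nat) : Int)
    · rw [if_pos ⟨hNk, hc⟩]
      show [N + 1 - (1 + (k - tri (N - 1)) - 1), 1 + (k - tri (N - 1)) - 1] = _
      have hNN : tri (N - 1) + ((N.toNat : Nat) : Int) = tri N := by
        rw [tri_succ N]; omega
      -- k lands on diagonal N, so M = N
      have hMN : M = N := by
        by_contra hne
        have hlt : N < M := by omega
        have := tri_lt_tri (by omega : (0:Int) ≤ N) (by omega : N < M)
        have h2 : tri N ≤ tri (M - 1) := by
          rcases lt_or_eq_of_le (by omega : N ≤ M - 1) with h | h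
          · exact le_of_lt (tri_lt_tri (by omega) h)
          · rw [h]
        omega
      have e : 1 + (k - tri (N - 1)) - 1 = k - tri (N - 1) := by omega
      rw [hMN, e]
    · rw [if_neg (by tauto)]
      show IJ_while fuel (tri (N - 1) + ((N.toNat : Nat) : Int)) (N + 1) k = _
      have hNN : tri (N - 1) + ((N.toNat : Nat) : Int) = tri N := by
        rw [tri_succ N]; omega
      rw [hNN]
      have hNM' : N + 1 ≤ M := by
        by_contra hne
        have hMN : M = N := by omega
        subst hMN
        omega
      have hstep : tri N = tri ((N + 1) - 1) := by norm_num
      rw [hstep]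
      exact ih (N + 1) M k (by omega) hNM' (by rw [← hstep, ← hNN]; omega) hMk hkM (by omega)

theorem IJ_bsearch_spec : ∀ (n : Nat) (lo hi k : Int), (hi - lo).toNat = n → 1 ≤ lo →
    lo ≤ hi → tri (lo - 1) < k → k ≤ tri hi →
    1 ≤ IJ_bsearch lo hi k ∧ IJ_bsearch lo hi k ≤ hi ∧
      tri (IJ_bsearch lo hi k - 1) < k ∧ k ≤ tri (IJ_bsearch lo hi k) := by
  intro n
  induction n using Nat.strong_induction_on with
  | _ n ih =>
    intro lo hi k hn hlo hlohi hlok hkhi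
    rw [IJ_bsearch]
    by_cases h : lo < hi
    · rw [dif_pos h]
      simp only []
      have hmid := PySem.Int.floordiv_two_mid_bounds (le_of_lt h)
      have hmid2 : PySem.Int.floordiv (lo + hi) 2 < hi := by
        rw [PySem.Int.floordiv_eq_ediv_of_pos (by omega : (0:Int) < 2)]
        omega
      set mid := PySem.Int.floordiv (lo + hi) 2 with hmiddef
      have htri : PySem.Int.floordiv (mid * (mid + 1)) 2 = tri mid := by
        rw [PySem.Int.floordiv_eq_ediv_of_pos (by omega : (0:Int) < 2)]; rfl
      rw [htri]
      by_cases hc : k ≤ tri mid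
      · rw [if_pos hc]
        obtain ⟨h1, h2, h3, h4⟩ := ih (mid - lo).toNat (by omega) lo mid k rfl hlo (by omega) hlok hc
        exact ⟨h1, by omega, h3, h4⟩
      · rw [if_neg hc]
        have : tri (mid + 1 - 1) < k := by norm_num; omega
        exact ih (hi - (mid + 1)).toNat (by omega) (mid + 1) hi k rfl (by omega) (by omega) this hkhi
    · rw [dif_neg h]
      have : lo = hi := by omega
      subst this
      exact ⟨hlo, le_refl _, hlok, hkhi⟩

-- ===== VERDICT (by name: the statement is the Claim_ definition above) =====
theorem IJ_spec : Claim_equal_IJ := by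
  intro k _ hk
  unfold Spec_IJ IJ IJ_alt
  have hk1 : (1 : Int) ≤ k := hk
  have hkk : k ≤ tri k := by
    have := two_tri k
    nlinarith
  have h0 : tri (1 - 1) < k := by norm_num [tri]; omega
  obtain ⟨h1, h2, h3, h4⟩ := IJ_bsearch_spec (k - 1).toNat 1 k k (by omega) (by omega) hk1 h0 hkk
  set M := IJ_bsearch 1 k k with hM
  have hstart : (0 : Int) = tri (1 - 1) := by norm_num [tri]
  rw [hstart, IJ_while_spec (k.toNat + 1) 1 M k (by omega) h1 h0 h3 h4 (by omega)]
  have hfl : PySem.Int.floordiv (M * (M - 1)) 2 = tri (M - 1) := by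
    rw [PySem.Int.floordiv_eq_ediv_of_pos (by omega : (0:Int) < 2)]
    unfold tri
    ring_nf
  simp only [hfl]
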